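-- pv_equiv track=rewrite | github.com/miliar/Code_Jam_Webscraper | solutions_python/Problem_138/971.py | solve
-- ===== SOURCE A (Python) =====
-- def solve(A, B):
--     B = B[:]
--     for i, a in enumerate(A):
--         nxt = next((b for b in B if b > a), None)
--         if nxt is None:
--             return len(A) - i
--         else: B.remove(nxt)
--     return 0
-- ===== SOURCE B (Python) =====
-- def solve(A, B):
--     # Segment-tree-style persistent max tree over B's positions: leftmost element > a
--     # is found and deleted in O(log m) instead of A's two linear scans per step.
--     # Node: ('leaf', value, alive) or ('node', maxAlive_or_None, left, right).
--     def mx(t):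
--         if t[0] == 'leaf':
--             return t[1] if t[2] else None
--         return t[1]
--
--     def max_opt(x, y):
--         if x is None:
--             return y
--         if y is None:
--             return x
--         return x if x >= y else y
--
--     def gt_opt(m, a):
--         return m is not None and m > a
--
--     def mk_node(l, r):
--         return ('node', max_opt(mx(l), mx(r)), l, r)
--
--     def build(xs):
--         if len(xs) == 1:
--             return ('leaf', xs[0], True)
--         m = len(xs) // 2
--         return mk_node(build(xs[:m]), build(xs[m:]))
--
--     def qd(t, a):
--         # delete leftmost alive element > a; None if there is none
--         if t[0] == 'leaf':
--             if t[2] and t[1] > a: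
--                 return ('leaf', t[1], False)
--             return None
--         if not gt_opt(t[1], a):
--             return None
--         l2 = qd(t[2], a)
--         if l2 is not None:
--             return mk_node(l2, t[3])
--         r2 = qd(t[3], a)
--         if r2 is not None:
--             return mk_node(t[2], r2)
--         return None
--
--     t = ('leaf', 0, False) if not B else build(B)
--     n = len(A)
--     for i, a in enumerate(A):
--         t2 = qd(t, a)
--         if t2 is None:
--             return n - i
--         t = t2
--     return 0
-- ===== Notes on version B (the rewrite author's own statement) =====
-- stated objective: faster
-- what changed: Replaces A's per-element linear scans over the remaining B (generator scan for the first b > a plus a value-based list.remove) with a persistent max-segment-tree over B's positions that finds and deletes the leftmost remaining element > a in O(log m).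
import Mathlib
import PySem

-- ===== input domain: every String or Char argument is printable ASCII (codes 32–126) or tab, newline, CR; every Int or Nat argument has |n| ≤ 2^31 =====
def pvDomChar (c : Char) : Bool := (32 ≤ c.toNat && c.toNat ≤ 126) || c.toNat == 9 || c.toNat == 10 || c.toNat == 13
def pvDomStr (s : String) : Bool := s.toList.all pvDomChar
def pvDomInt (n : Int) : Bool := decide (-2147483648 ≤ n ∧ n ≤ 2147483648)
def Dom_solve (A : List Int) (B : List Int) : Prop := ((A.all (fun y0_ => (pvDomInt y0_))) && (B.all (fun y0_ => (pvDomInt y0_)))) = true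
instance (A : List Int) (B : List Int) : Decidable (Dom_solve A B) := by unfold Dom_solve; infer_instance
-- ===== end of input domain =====

-- B replaces A's per-step linear scans (first b > a, then value remove) by a persistent
-- max-tree over B's positions, deleting the leftmost element > a in logarithmic steps
-- (objective: alternative/asymptotically better algorithm, same exact result).

-- ===== PORT A =====
-- for i, a in enumerate(A): nxt = next((b for b in B if b > a), None); None -> len(A)-i; else B.remove(nxt)
def solveLoop (lenA : Int) (i : Int) (as_ : List Int) (B : List Int) : Int :=
  match as_ with
  | [] => 0
  | a :: rest =>
    match B.find? (fun b => a < b) with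
    | none => lenA - i
    | some nxt => solveLoop lenA (i + 1) rest ((PySem.List.remove? B nxt).getD B)

def solve (A : List Int) (B : List Int) : Int :=
  solveLoop (A.length : Int) 0 A B

-- ===== PORT B =====
inductive MaxTree where
  | leaf : Int → Bool → MaxTree
  | node : Option Int → MaxTree → MaxTree → MaxTree
deriving DecidableEq, Repr

def MaxTree.mx : MaxTree → Option Int
  | .leaf v alive => if alive then some v else none
  | .node m _ _ => m

def maxOpt : Option Int → Option Int → Option Int
  | none, y => y
  | some x, none => some x
  | some x, some y => some (if x ≥ y then x else y)

def gtOpt (m : Option Int) (a : Int) : Bool :=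
  match m with
  | none => false
  | some x => a < x

def mkNode (l r : MaxTree) : MaxTree :=
  .node (maxOpt l.mx r.mx) l r

def buildNE : List Int → MaxTree
  | [] => .leaf 0 false
  | [x] => .leaf x true
  | x :: y :: rest =>
    let m := (x :: y :: rest).length / 2
    mkNode (buildNE ((x :: y :: rest).take m)) (buildNE ((x :: y :: rest).drop m))
termination_by l => l.length
decreasing_by
  · simp [List.length_take]; omega
  · simp [List.length_drop]; omega

def buildT (xs : List Int) : MaxTree :=
  match xs with
  | [] => .leaf 0 false
  | _ => buildNE xs

def qd (t : MaxTree) (a : Int) : Option MaxTree :=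
  match t with
  | .leaf v alive => if alive && a < v then some (.leaf v false) else none
  | .node m l r =>
    if gtOpt m a then
      match qd l a with
      | some l' => some (mkNode l' r)
      | none =>
        match qd r a with
        | some r' => some (mkNode l r')
        | none => none
    else none

def altLoop (lenA : Int) (i : Int) (as_ : List Int) (t : MaxTree) : Int :=
  match as_ with
  | [] => 0
  | a :: rest =>
    match qd t a with
    | none => lenA - i
    | some t' => altLoop lenA (i + 1) rest t'

def solve_alt (A : List Int) (B : List Int) : Int :=
  altLoop (A.length : Int) 0 A (buildT B)

-- ===== PRECONDITION & SPEC =====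
def Spec_solve (A : List Int) (B : List Int) (out : Int) : Prop := out = solve_alt A B
instance (A : List Int) (B : List Int) (out : Int) : Decidable (Spec_solve A B out) := by unfold Spec_solve; infer_instance

-- ===== CLAIM (what is proved, stated in full; the proofs are below) =====
def Claim_equal_solve : Prop := ∀ (A : List Int) (B : List Int), Dom_solve A B → Spec_solve A B (solve A B)

-- ===== LEMMAS AND PROOFS =====

-- alive elements of a tree, in position order
def MaxTree.toL : MaxTree → List Int
  | .leaf v alive => if alive then [v] else []
  | .node _ l r => l.toL ++ r.toL

-- cached maxima are correct
def MaxTree.WF : MaxTree → Prop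
  | .leaf _ _ => True
  | .node m l r => m = maxOpt l.mx r.mx ∧ l.WF ∧ r.WF

-- remove the first element greater than a
def rmGt (a : Int) : List Int → List Int
  | [] => []
  | x :: xs => if a < x then xs else x :: rmGt a xs

theorem gtOpt_maxOpt (x y : Option Int) (a : Int) :
    gtOpt (maxOpt x y) a = (gtOpt x a || gtOpt y a) := by
  cases x <;> cases y <;> simp only [maxOpt, gtOpt, Bool.false_or, Bool.or_false]
  split_ifs <;> simp <;> omega

theorem gtOpt_mx (t : MaxTree) (a : Int) (h : t.WF) :
    gtOpt t.mx a = t.toL.any (fun b => a < b) := by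
  induction t with
  | leaf v alive => cases alive <;> simp [MaxTree.mx, MaxTree.toL, gtOpt]
  | node m l r ihl ihr =>
    obtain ⟨hm, hl, hr⟩ := h
    have hmx : (MaxTree.node m l r).mx = m := rfl
    rw [hmx, hm, gtOpt_maxOpt, ihl hl, ihr hr]
    simp [MaxTree.toL]

theorem qd_eq_none (t : MaxTree) (a : Int) (h : t.WF) :
    qd t a = none ↔ gtOpt t.mx a = false := by
  induction t with
  | leaf v alive => cases alive <;> simp [qd, MaxTree.mx, gtOpt]
  | node m l r ihl ihr =>
    obtain ⟨hm, hl, hr⟩ := h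
    simp only [qd, MaxTree.mx]
    by_cases hg : gtOpt m a
    · simp only [hg, if_true]
      rw [hm, gtOpt_maxOpt] at hg
      rcases hgl : qd l a with _ | l'
      · rcases hgr : qd r a with _ | r'
        · exfalso
          rw [ihl hl] at hgl; rw [ihr hr] at hgr
          rw [hgl, hgr] at hg; simp at hg
        · simp
      · simp
    · simp [hg]

theorem rmGt_append_left (a : Int) (l1 l2 : List Int)
    (h : l1.any (fun b => a < b) = true) :
    rmGt a (l1 ++ l2) = rmGt a l1 ++ l2 := by
  induction l1 with
  | nil => simp at h
  | cons x xs ih =>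
    by_cases hx : a < x
    · simp [rmGt, hx]
    · simp only [List.any_cons, Bool.or_eq_true, decide_eq_true_eq] at h
      rcases h with h | h
      · omega
      · simp [rmGt, hx, ih h]

theorem rmGt_append_right (a : Int) (l1 l2 : List Int)
    (h : l1.any (fun b => a < b) = false) :
    rmGt a (l1 ++ l2) = l1 ++ rmGt a l2 := by
  induction l1 with
  | nil => simp
  | cons x xs ih =>
    simp only [List.any_cons, Bool.or_eq_false_iff, decide_eq_false_iff_not] at h
    simp [rmGt, h.1, ih h.2]

theorem WF_mkNode (l r : MaxTree) (hl : l.WF) (hr : r.WF) : (mkNode l r).WF := by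
  exact ⟨rfl, hl, hr⟩

theorem qd_eq_some (t : MaxTree) (a : Int) (h : t.WF) (t' : MaxTree)
    (hq : qd t a = some t') : t'.WF ∧ t'.toL = rmGt a t.toL := by
  induction t generalizing t' with
  | leaf v alive =>
    cases alive
    · simp [qd] at hq
    · simp only [qd, Bool.true_and] at hq
      by_cases hv : a < v
      · simp only [hv, if_pos, decide_true, Option.some.injEq] at hq
        subst hq
        simp [MaxTree.WF, MaxTree.toL, rmGt, hv]
      · simp [hv] at hq
  | node m l r ihl ihr =>
    obtain ⟨hm, hl, hr⟩ := h
    simp only [qd] at hq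
    by_cases hg : gtOpt m a
    · simp only [hg, if_true] at hq
      rcases hgl : qd l a with _ | l2
      · rcases hgr : qd r a with _ | r2
        · simp [hgl, hgr] at hq
        · simp only [hgl, hgr, Option.some.injEq] at hq
          subst hq
          obtain ⟨hw, he⟩ := ihr hr r2 hgr
          have hnl : l.toL.any (fun b => a < b) = false := by
            rw [← gtOpt_mx l a hl, ← qd_eq_none l a hl]; exact hgl
          refine ⟨WF_mkNode _ _ hl hw, ?_⟩
          simp [mkNode, MaxTree.toL, he, rmGt_append_right a _ _ hnl]
      · simp only [hgl, Option.some.injEq] at hq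
        subst hq
        obtain ⟨hw, he⟩ := ihl hl l2 hgl
        have hal : l.toL.any (fun b => a < b) = true := by
          rw [← gtOpt_mx l a hl]
          cases hgx : gtOpt l.mx a with
          | false => rw [(qd_eq_none l a hl).2 hgx] at hgl; cases hgl
          | true => rfl
        refine ⟨WF_mkNode _ _ hw hr, ?_⟩
        simp [mkNode, MaxTree.toL, he, rmGt_append_left a _ _ hal]
    · simp [hg] at hq

theorem buildNE_WF (l : List Int) : (buildNE l).WF := by
  induction l using buildNE.induct with
  | case1 => simp [buildNE, MaxTree.WF]
  | case2 x => simp [buildNE, MaxTree.WF]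
  | case3 x y rest m ih1 ih2 =>
    rw [buildNE]
    exact WF_mkNode _ _ ih1 ih2

theorem buildNE_toL (l : List Int) : (buildNE l).toL = l := by
  induction l using buildNE.induct with
  | case1 => simp [buildNE, MaxTree.toL]
  | case2 x => simp [buildNE, MaxTree.toL]
  | case3 x y rest m ih1 ih2 =>
    rw [buildNE]
    simp only [mkNode, MaxTree.toL]
    rw [ih1, ih2]
    exact List.take_append_drop _ _

theorem buildT_WF (xs : List Int) : (buildT xs).WF := by
  cases xs <;> simp [buildT, MaxTree.WF, buildNE_WF]

theorem buildT_toL (xs : List Int) : (buildT xs).toL = xs := by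
  cases xs with
  | nil => simp [buildT, MaxTree.toL]
  | cons x xs => exact buildNE_toL _

-- A's step: find?-then-remove equals rmGt, and find? = none iff no element > a
theorem find?_remove_eq_rmGt (a : Int) (B : List Int) (nxt : Int)
    (h : B.find? (fun b => a < b) = some nxt) :
    PySem.List.remove? B nxt = some (rmGt a B) := by
  induction B with
  | nil => simp at h
  | cons x xs ih =>
    by_cases hx : a < x
    · rw [List.find?_cons_of_pos (by simpa using hx)] at h
      injection h with h; subst h
      simp [rmGt, hx]
    · rw [List.find?_cons_of_neg (by simpa using hx)] at h
      have hnx : a < nxt := by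
        have := List.find?_some h
        simpa using this
      have hne : x ≠ nxt := by omega
      rw [PySem.List.remove?_cons_of_ne xs hne, ih h]
      simp [rmGt, hx]

theorem find?_eq_none_iff_any (a : Int) (B : List Int) :
    B.find? (fun b => a < b) = none ↔ B.any (fun b => a < b) = false := by
  simp [List.find?_eq_none, List.any_eq_false]

theorem loop_eq (as_ : List Int) (lenA i : Int) (B : List Int) (t : MaxTree)
    (hw : t.WF) (ht : t.toL = B) :
    solveLoop lenA i as_ B = altLoop lenA i as_ t := by
  induction as_ generalizing i B t with
  | nil => simp [solveLoop, altLoop]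
  | cons a rest ih =>
    simp only [solveLoop, altLoop]
    rcases hf : B.find? (fun b => a < b) with _ | nxt
    · have hnone : qd t a = none := by
        rw [qd_eq_none t a hw, gtOpt_mx t a hw, ht]
        rw [find?_eq_none_iff_any] at hf
        exact hf
      rw [hnone]
    · have hany : B.any (fun b => a < b) = true := by
        cases hx : B.any (fun b => a < b) with
        | false => rw [(find?_eq_none_iff_any a B).2 hx] at hf; cases hf
        | true => rfl
      have hsome : qd t a ≠ none := by
        rw [Ne, qd_eq_none t a hw, gtOpt_mx t a hw, ht]
        simp [hany]
      rcases hq : qd t a with _ | t'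
      · exact absurd hq hsome
      · obtain ⟨hw', ht'⟩ := qd_eq_some t a hw t' hq
        dsimp only
        rw [find?_remove_eq_rmGt a B nxt hf]
        simp only [Option.getD_some]
        exact ih (i + 1) (rmGt a B) t' hw' (by rw [ht', ht])

-- ===== VERDICT (by name: the statement is the Claim_ definition above) =====
theorem solve_spec : Claim_equal_solve := by
  intro A B _
  unfold Spec_solve solve solve_alt
  exact loop_eq A (A.length : Int) 0 B (buildT B) (buildT_WF B) (buildT_toL B)
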